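-- pv_equiv track=rewrite | github.com/jackob95/Sumowanie_indeksow | main.py | get_pair_num
-- ===== SOURCE A (Python) =====
-- def get_pair_num(arr, n):
--     count = 0  # rozpoczynamy zliczanie od 0
--     l = len(arr) # pobieramy długośc tablicy
--
--     for i in range(0, l):
--         for j in range(i + 1, l):
--             if arr[i] + arr[j] == n:
--                 count = count + i + j #sumowanie indeksów
--
--     return count
-- ===== SOURCE B (Python) =====
-- def get_pair_num(arr, n):
--     count = 0
--     seen = {}  # value -> (occurrences so far, sum of their indices)
--     for j, v in enumerate(arr):
--         c, s = seen.get(n - v, (0, 0))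
--         count += c * j + s
--         c2, s2 = seen.get(v, (0, 0))
--         seen[v] = (c2 + 1, s2 + j)
--     return count
-- ===== Notes on version B (the rewrite author's own statement) =====
-- stated objective: faster
-- what changed: Replaced the O(n^2) nested index loops by a single pass with a hash map from value to (count, index-sum) of earlier occurrences, adding c*j+s at each position j.
import Mathlib
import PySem

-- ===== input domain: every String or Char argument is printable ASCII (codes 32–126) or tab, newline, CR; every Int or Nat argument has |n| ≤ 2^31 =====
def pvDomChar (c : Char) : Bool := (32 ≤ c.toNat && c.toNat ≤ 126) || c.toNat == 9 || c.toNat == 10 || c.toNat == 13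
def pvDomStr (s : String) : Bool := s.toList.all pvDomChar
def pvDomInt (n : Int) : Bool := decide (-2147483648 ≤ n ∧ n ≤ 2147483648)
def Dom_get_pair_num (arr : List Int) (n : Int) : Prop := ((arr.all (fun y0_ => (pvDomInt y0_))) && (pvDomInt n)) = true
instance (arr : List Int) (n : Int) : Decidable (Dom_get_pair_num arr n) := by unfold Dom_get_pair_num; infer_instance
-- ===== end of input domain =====

-- B replaces A's nested index loops by one pass with a dict mapping each value to
-- (count, index-sum) of its earlier occurrences; the return values are proved equal.

-- ===== PORT A =====
-- for i in range(0, l): for j in range(i+1, l): if arr[i]+arr[j]==n: count += i+j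
def get_pair_num (arr : List Int) (n : Int) : Int :=
  (PySem.List.pyRange 0 (arr.length : Int) 1).foldl (fun count i =>
    (PySem.List.pyRange (i + 1) (arr.length : Int) 1).foldl (fun count j =>
      if PySem.List.pyGetD arr i 0 + PySem.List.pyGetD arr j 0 = n then count + i + j
      else count) count) 0

-- ===== PORT B =====
-- loop body: c,s = seen.get(n-v,(0,0)); count += c*j+s; c2,s2 = seen.get(v,(0,0)); seen[v]=(c2+1,s2+j)
def get_pair_num_alt_step (n : Int) (st : Int × PySem.Dict Int (Int × Int)) (p : Int × Int) :
    Int × PySem.Dict Int (Int × Int) :=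
  let cs := st.2.getD (n - p.2) (0, 0)
  let count := st.1 + cs.1 * p.1 + cs.2
  let cs2 := st.2.getD p.2 (0, 0)
  (count, st.2.insert p.2 (cs2.1 + 1, cs2.2 + p.1))

def get_pair_num_alt (arr : List Int) (n : Int) : Int :=
  ((PySem.List.enumerate arr 0).foldl (get_pair_num_alt_step n) (0, PySem.Dict.empty)).1

-- ===== PRECONDITION & SPEC =====
def Spec_get_pair_num (arr : List Int) (n : Int) (out : Int) : Prop := out = get_pair_num_alt arr n
instance (arr : List Int) (n : Int) (out : Int) : Decidable (Spec_get_pair_num arr n out) := by unfold Spec_get_pair_num; infer_instance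

-- ===== CLAIM (what is proved, stated in full; the proofs are below) =====
def Claim_equal_get_pair_num : Prop := ∀ (arr : List Int) (n : Int), Dom_get_pair_num arr n → Spec_get_pair_num arr n (get_pair_num arr n)

-- ===== LEMMAS AND PROOFS =====

-- A as a double sum over index ranges
def pvS (arr : List Int) (n : Int) : Int :=
  ((PySem.List.pyRange 0 (arr.length : Int) 1).map (fun i =>
    ((PySem.List.pyRange (i + 1) (arr.length : Int) 1).map (fun j =>
      if PySem.List.pyGetD arr i 0 + PySem.List.pyGetD arr j 0 = n then i + j else 0)).sum)).sum

-- occurrences of v in arr, and the sum of their indices, as sums over enumerate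
def pvCnt (arr : List Int) (v : Int) : Int :=
  ((PySem.List.enumerate arr 0).map (fun p => if p.2 = v then (1 : Int) else 0)).sum
def pvIsum (arr : List Int) (v : Int) : Int :=
  ((PySem.List.enumerate arr 0).map (fun p => if p.2 = v then p.1 else 0)).sum

def pvState (arr : List Int) (n : Int) : Int × PySem.Dict Int (Int × Int) :=
  (PySem.List.enumerate arr 0).foldl (get_pair_num_alt_step n) (0, PySem.Dict.empty)

lemma pv_step_eq (n : Int) (st : Int × PySem.Dict Int (Int × Int)) (p : Int × Int) :
    get_pair_num_alt_step n st p =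
      (st.1 + (st.2.getD (n - p.2) (0, 0)).1 * p.1 + (st.2.getD (n - p.2) (0, 0)).2,
       st.2.insert p.2 ((st.2.getD p.2 (0, 0)).1 + 1, (st.2.getD p.2 (0, 0)).2 + p.1)) := rfl

lemma pv_A_eq_S (arr : List Int) (n : Int) : get_pair_num arr n = pvS arr n := by
  unfold get_pair_num pvS
  have hinner : (fun (count i : Int) =>
      (PySem.List.pyRange (i + 1) (arr.length : Int) 1).foldl (fun count j =>
        if PySem.List.pyGetD arr i 0 + PySem.List.pyGetD arr j 0 = n then count + i + j
        else count) count) =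
      (fun (count i : Int) => count +
        ((PySem.List.pyRange (i + 1) (arr.length : Int) 1).map (fun j =>
          if PySem.List.pyGetD arr i 0 + PySem.List.pyGetD arr j 0 = n then i + j else 0)).sum) := by
    funext c i
    have hbody : (fun (count j : Int) =>
        if PySem.List.pyGetD arr i 0 + PySem.List.pyGetD arr j 0 = n then count + i + j
        else count) =
        (fun (count j : Int) => count +
          (if PySem.List.pyGetD arr i 0 + PySem.List.pyGetD arr j 0 = n then i + j else 0)) := by
      funext c j; split_ifs <;> ring
    rw [hbody, PySem.List.foldl_add]
  rw [hinner, PySem.List.foldl_add]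
  simp

lemma pv_enum_append (arr : List Int) (x : Int) :
    PySem.List.enumerate (arr ++ [x]) 0 = PySem.List.enumerate arr 0 ++ [((arr.length : Int), x)] := by
  rw [PySem.List.enumerate_append]
  simp [PySem.List.enumerate_cons, PySem.List.enumerate_nil]

lemma pvState_append (arr : List Int) (x n : Int) :
    pvState (arr ++ [x]) n = get_pair_num_alt_step n (pvState arr n) ((arr.length : Int), x) := by
  unfold pvState
  rw [pv_enum_append, List.foldl_append]
  simp

lemma pvCnt_append (arr : List Int) (x v : Int) :
    pvCnt (arr ++ [x]) v = pvCnt arr v + (if x = v then 1 else 0) := by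
  unfold pvCnt
  rw [pv_enum_append]
  simp

lemma pvIsum_append (arr : List Int) (x v : Int) :
    pvIsum (arr ++ [x]) v = pvIsum arr v + (if x = v then (arr.length : Int) else 0) := by
  unfold pvIsum
  rw [pv_enum_append]
  simp

lemma pv_dict_inv (arr : List Int) (n v : Int) :
    (pvState arr n).2.getD v (0, 0) = (pvCnt arr v, pvIsum arr v) := by
  induction arr using List.reverseRecOn generalizing v with
  | nil => simp [pvState, pvCnt, pvIsum, PySem.List.enumerate_nil]
  | append_singleton arr x ih =>
    rw [pvState_append, pv_step_eq]
    simp only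
    rw [PySem.Dict.getD_insert, pvCnt_append, pvIsum_append, ih]
    by_cases h : v = x
    · simp [h]
    · have h' : ¬ (x = v) := fun hh => h hh.symm
      simp only [if_neg h, if_neg h']
      rw [ih v]; simp

lemma pv_B_step (arr : List Int) (x n : Int) :
    (pvState (arr ++ [x]) n).1 =
      (pvState arr n).1 + pvCnt arr (n - x) * (arr.length : Int) + pvIsum arr (n - x) := by
  rw [pvState_append, pv_step_eq]
  simp only
  rw [pv_dict_inv arr n (n - x)]

lemma pv_pair_sum (ps : List (Int × Int)) (x n L : Int) :
    (ps.map (fun p => if p.2 + x = n then p.1 + L else 0)).sum =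
      (ps.map (fun p => if p.2 = n - x then (1 : Int) else 0)).sum * L +
      (ps.map (fun p => if p.2 = n - x then p.1 else 0)).sum := by
  induction ps with
  | nil => simp
  | cons p ps ih =>
    simp only [List.map_cons, List.sum_cons, ih]
    have hiff : (p.2 + x = n) ↔ (p.2 = n - x) := by omega
    by_cases h : p.2 = n - x
    · rw [if_pos h, if_pos h, if_pos (hiff.2 h)]; ring
    · rw [if_neg h, if_neg h, if_neg (fun hh => h (hiff.1 hh))]; ring

lemma pv_getD_append_lt (arr : List Int) (x i : Int) (h0 : 0 ≤ i) (h : i < (arr.length : Int)) :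
    PySem.List.pyGetD (arr ++ [x]) i 0 = PySem.List.pyGetD arr i 0 := by
  obtain ⟨k, rfl⟩ := Int.eq_ofNat_of_zero_le h0
  rw [PySem.List.pyGetD_natCast, PySem.List.pyGetD_natCast]
  have hk : k < arr.length := by exact_mod_cast h
  simp [List.getD, List.getElem?_append_left hk]

lemma pv_getD_append_self (arr : List Int) (x : Int) :
    PySem.List.pyGetD (arr ++ [x]) (arr.length : Int) 0 = x := by
  rw [PySem.List.pyGetD_natCast]
  simp [List.getD]

lemma pv_S_step (arr : List Int) (x n : Int) :
    pvS (arr ++ [x]) n = pvS arr n +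
      ((PySem.List.enumerate arr 0).map (fun p =>
        if p.2 + x = n then p.1 + (arr.length : Int) else 0)).sum := by
  unfold pvS
  have hL : (0 : Int) ≤ (arr.length : Int) := by positivity
  rw [show (((arr ++ [x]).length : Nat) : Int) = (arr.length : Int) + 1 by simp]
  rw [PySem.List.pyRange_one_succ_right hL, List.map_append, List.sum_append]
  have hlast : ((PySem.List.pyRange ((arr.length : Int) + 1) ((arr.length : Int) + 1) 1).map
      (fun j => if PySem.List.pyGetD (arr ++ [x]) (arr.length : Int) 0 +
        PySem.List.pyGetD (arr ++ [x]) j 0 = n then (arr.length : Int) + j else 0)).sum = 0 := by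
    rw [PySem.List.pyRange_one_eq_nil le_rfl]; simp
  simp only [List.map_singleton, List.sum_singleton, hlast, add_zero]
  rw [PySem.List.enumerate_eq_map_pyRange arr 0, List.map_map]
  simp only [PySem.List.len_eq]
  rw [← PySem.List.sum_map_add_int]
  congr 1
  apply List.map_congr_left
  intro i hi
  have hmem := (PySem.List.mem_pyRange_one).1 (by simpa [PySem.List.len_eq] using hi)
  obtain ⟨hi0, hiL⟩ := hmem
  have hstep : i + 1 ≤ (arr.length : Int) := by omega
  rw [PySem.List.pyRange_one_succ_right hstep, List.map_append, List.sum_append]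
  simp only [List.map_singleton, List.sum_singleton, Function.comp]
  rw [pv_getD_append_lt arr x i hi0 hiL, pv_getD_append_self arr x]
  congr 1
  apply congrArg
  apply List.map_congr_left
  intro j hj
  obtain ⟨hj1, hjL⟩ := (PySem.List.mem_pyRange_one).1 hj
  rw [pv_getD_append_lt arr x j (by omega) hjL]

lemma pv_S_eq_B (arr : List Int) (n : Int) : pvS arr n = (pvState arr n).1 := by
  induction arr using List.reverseRecOn with
  | nil => simp [pvS, pvState, PySem.List.enumerate_nil, PySem.List.pyRange_one_eq_nil]
  | append_singleton arr x ih =>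
    rw [pv_S_step, pv_B_step, ih, pv_pair_sum (PySem.List.enumerate arr 0) x n (arr.length : Int)]
    unfold pvCnt pvIsum
    ring

-- ===== VERDICT (by name: the statement is the Claim_ definition above) =====
theorem get_pair_num_spec : Claim_equal_get_pair_num := by
  intro arr n _
  unfold Spec_get_pair_num get_pair_num_alt
  rw [pv_A_eq_S, pv_S_eq_B]
  rfl
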